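-- pv_equiv track=rewrite | github.com/karimlasri/RI-Web | BSBI/main.py | bsbi_invert
-- ===== SOURCE A (Python) =====
-- def bsbi_invert(list_of_pairs):
--     list_of_pairs.sort(key = lambda x : x[0])
--     list_postings_all = []
--     for e1, e2 in list_of_pairs:
--         if len(list_postings_all) == 0:
--             list_postings_all += [[[e1, e2, 1]]]
--         else:
--             list_posting_last_word = list_postings_all[len(list_postings_all)-1]
--             last_posting = list_posting_last_word[len(list_posting_last_word)-1]
--             if e1 == last_posting[0]:
--                 if e2 == last_posting[1]:
--                     last_posting[2] += 1
--                 else: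
--                     list_posting_last_word += [[e1, e2, 1]]
--             else:
--                 list_postings_all += [[[e1, e2, 1]]]
--     return list_postings_all
-- ===== SOURCE B (Python) =====
-- def bsbi_invert(list_of_pairs):
--     # Same in-place stable sort by term as the original (same mutation side effect).
--     list_of_pairs.sort(key=lambda x: x[0])
--     return _invert(list_of_pairs)
--
--
-- def _invert(pairs):
--     # Divide and conquer: invert each half, then merge at the boundary.
--     if not pairs:
--         return []
--     if len(pairs) == 1:
--         e1, e2 = pairs[0]
--         return [[[e1, e2, 1]]]
--     mid = len(pairs) // 2
--     return _merge(_invert(pairs[:mid]), _invert(pairs[mid:]))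
--
--
-- def _merge(left, right):
--     # left and right are nonempty postings structures of adjacent slices.
--     lg = left[-1]
--     rg = right[0]
--     if lg[-1][0] != rg[0][0]:
--         return left + right
--     lp = lg[-1]
--     rp = rg[0]
--     if lp[1] == rp[1]:
--         fused = lg[:-1] + [[lp[0], lp[1], lp[2] + rp[2]]] + rg[1:]
--     else:
--         fused = lg + rg
--     return left[:-1] + [fused] + right[1:]
-- ===== Notes on version B (the rewrite author's own statement) =====
-- stated objective: alternative
-- what changed: Replaces A's single forward scan that mutates the tail of a growing accumulator with a divide-and-conquer scheme: after the same in-place sort, the list is split in halves, each half is inverted recursively, and the two postings structures are merged by fusing (or concatenating) the boundary term group and boundary posting.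
import Mathlib
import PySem

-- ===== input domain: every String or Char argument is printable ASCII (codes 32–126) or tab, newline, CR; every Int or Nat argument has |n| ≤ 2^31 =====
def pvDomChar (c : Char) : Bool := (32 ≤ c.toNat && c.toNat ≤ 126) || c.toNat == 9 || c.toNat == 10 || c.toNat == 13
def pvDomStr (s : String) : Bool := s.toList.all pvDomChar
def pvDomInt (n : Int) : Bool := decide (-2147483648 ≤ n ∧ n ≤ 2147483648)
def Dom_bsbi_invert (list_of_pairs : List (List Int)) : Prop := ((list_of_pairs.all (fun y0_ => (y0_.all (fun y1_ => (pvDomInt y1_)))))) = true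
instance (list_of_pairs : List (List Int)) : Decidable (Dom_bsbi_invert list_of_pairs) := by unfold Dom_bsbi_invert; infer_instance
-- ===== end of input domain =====

-- B replaces A's single forward scan mutating the tail of a growing accumulator by a
-- divide-and-conquer scheme: sort, invert the two halves recursively, merge the two
-- postings structures at the boundary. Both Pythons sort list_of_pairs IN PLACE
-- (identical mutation); the equivalence proved here is about the return value.

-- ===== PORT A =====
-- One loop step of A. Under Pre_ every inner list has length exactly 2, so `l.getD 0 0` /
-- `l.getD 1 0` are exactly Python's unpacking `e1, e2 = l`, and `x.getD 0 0` is the sort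
-- key `x[0]`; the in-place mutations of the last group / last posting become `List.set`.
def pvStepA (acc : List (List (List Int))) (l : List Int) : List (List (List Int)) :=
  let e1 := l.getD 0 0
  let e2 := l.getD 1 0
  if acc.length = 0 then
    acc ++ [[[e1, e2, 1]]]
  else
    let lpw := acc.getD (acc.length - 1) []
    let lp := lpw.getD (lpw.length - 1) []
    if e1 = lp.getD 0 0 then
      if e2 = lp.getD 1 0 then
        acc.set (acc.length - 1) (lpw.set (lpw.length - 1) (lp.set 2 (lp.getD 2 0 + 1)))
      else
        acc.set (acc.length - 1) (lpw ++ [[e1, e2, 1]])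
    else
      acc ++ [[[e1, e2, 1]]]

def bsbi_invert (list_of_pairs : List (List Int)) : List (List (List Int)) :=
  (PySem.List.sorted list_of_pairs (fun x => x.getD 0 0)).foldl pvStepA []

-- ===== PORT B =====
-- Transliteration of Source B's `_merge`. `left[-1]` / `right[0]` become `getLastD []` /
-- `headD []` (both arguments are nonempty at every call site, exactly as in Source B);
-- `lg[:-1]` is `dropLast`, `rg[1:]` is `tail`.
def pvMerge2 (left right : List (List (List Int))) : List (List (List Int)) :=
  let lg := left.getLastD []
  let rg := right.headD []
  if (lg.getLastD []).getD 0 0 ≠ (rg.headD []).getD 0 0 then left ++ right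
  else
    let lp := lg.getLastD []
    let rp := rg.headD []
    let fused :=
      if lp.getD 1 0 = rp.getD 1 0 then
        lg.dropLast ++ [[lp.getD 0 0, lp.getD 1 0, lp.getD 2 0 + rp.getD 2 0]] ++ rg.tail
      else lg ++ rg
    left.dropLast ++ [fused] ++ right.tail

-- Transliteration of Source B's `_invert`: `pairs[:mid]` / `pairs[mid:]` with
-- 0 ≤ mid ≤ len(pairs) are exactly `take` / `drop`; `len(pairs) // 2` is Nat division.
def pvInv : List (List Int) → List (List (List Int))
  | [] => []
  | [l] => [[[l.getD 0 0, l.getD 1 0, 1]]]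
  | l :: m :: t =>
    pvMerge2 (pvInv ((l :: m :: t).take ((l :: m :: t).length / 2)))
             (pvInv ((l :: m :: t).drop ((l :: m :: t).length / 2)))
termination_by p => p.length
decreasing_by
  · simp
    omega
  · simp
    omega

def bsbi_invert_alt (list_of_pairs : List (List Int)) : List (List (List Int)) :=
  pvInv (PySem.List.sorted list_of_pairs (fun x => x.getD 0 0))

-- ===== PRECONDITION & SPEC =====
-- Pre_ = exactly the inputs where Python A returns: `e1, e2 = pair` (and the sort key
-- pair[0]) require every inner list to have length exactly 2, otherwise A raises
-- ValueError/IndexError.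
def Pre_bsbi_invert (list_of_pairs : List (List Int)) : Prop :=
  ∀ x ∈ list_of_pairs, x.length = 2
instance (list_of_pairs : List (List Int)) : Decidable (Pre_bsbi_invert list_of_pairs) := by
  unfold Pre_bsbi_invert; infer_instance
def pvWitness_bsbi_invert : List (List Int) := [[1, 2], [1, 2], [0, 3], [1, 3]]

def Spec_bsbi_invert (list_of_pairs : List (List Int)) (out : List (List (List Int))) : Prop :=
  out = bsbi_invert_alt list_of_pairs
instance (list_of_pairs : List (List Int)) (out : List (List (List Int))) : Decidable (Spec_bsbi_invert list_of_pairs out) := by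
  unfold Spec_bsbi_invert; infer_instance

-- ===== CLAIM (what is proved, stated in full; the proofs are below) =====
def Claim_equal_bsbi_invert : Prop := ∀ (list_of_pairs : List (List Int)), Dom_bsbi_invert list_of_pairs → Pre_bsbi_invert list_of_pairs → Spec_bsbi_invert list_of_pairs (bsbi_invert list_of_pairs)

-- ===== LEMMAS AND PROOFS =====

-- last-slot arithmetic on `X ++ [c]`
theorem pvGetD_last {α : Type} (X : List α) (c d : α) : (X ++ [c]).getD X.length d = c := by
  induction X with
  | nil => rfl
  | cons x X ih => simp only [List.cons_append, List.length_cons, List.getD_cons_succ]; exact ih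

theorem pvSet_last {α : Type} (X : List α) (c v : α) : (X ++ [c]).set X.length v = X ++ [v] := by
  induction X with
  | nil => rfl
  | cons x X ih => simp only [List.cons_append, List.length_cons, List.set_cons_succ]; exact congrArg (x :: ·) ih

-- maximal runs of adjacent r-related elements (itertools.groupby run structure)
def pvRunsCons {α : Type} (r : α → α → Bool) (a : α) : List (List α) → List (List α)
  | [] => [[a]]
  | [] :: gs => [a] :: gs
  | (b :: g) :: gs => if r a b then (a :: b :: g) :: gs else [a] :: (b :: g) :: gs

def pvRuns {α : Type} (r : α → α → Bool) : List α → List (List α)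
  | [] => []
  | a :: t => pvRunsCons r a (pvRuns r t)

theorem pvRuns_head {α : Type} (r : α → α → Bool) (b : α) (t : List α) :
    ∃ g gs, pvRuns r (b :: t) = (b :: g) :: gs := by
  induction t generalizing b with
  | nil => exact ⟨[], [], rfl⟩
  | cons c t ih =>
    obtain ⟨g, gs, h⟩ := ih c
    by_cases hr : r b c = true
    · exact ⟨c :: g, gs, by rw [pvRuns, h]; simp [pvRunsCons, hr]⟩
    · rw [Bool.not_eq_true] at hr
      exact ⟨[], (c :: g) :: gs, by rw [pvRuns, h]; simp [pvRunsCons, hr]⟩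

-- the key projections and the reference ("runs") form of the result
def pvKey0Eq (x y : List Int) : Bool := x.getD 0 0 == y.getD 0 0
def pvPairEq (x y : List Int) : Bool := (x.getD 0 0 == y.getD 0 0) && (x.getD 1 0 == y.getD 1 0)
def pvMkEntry (run : List (List Int)) : List Int :=
  [(run.headD []).getD 0 0, (run.headD []).getD 1 0, (run.length : Int)]
def pvInner (g : List (List Int)) : List (List Int) :=
  (pvRuns pvPairEq g).map pvMkEntry
def pvSpecB2 (s : List (List Int)) : List (List (List Int)) :=
  (pvRuns pvKey0Eq s).map pvInner

-- ===== A's fold equals pvSpecB2 =====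

def pvG (cur : List (List Int)) : List (List Int) → List (List (List Int))
  | [] => [cur]
  | l :: t =>
    if l.getD 0 0 = (cur.getD (cur.length - 1) []).getD 0 0 then
      if l.getD 1 0 = (cur.getD (cur.length - 1) []).getD 1 0 then
        pvG (cur.set (cur.length - 1)
          ((cur.getD (cur.length - 1) []).set 2 ((cur.getD (cur.length - 1) []).getD 2 0 + 1))) t
      else
        pvG (cur ++ [[l.getD 0 0, l.getD 1 0, 1]]) t
    else
      cur :: pvG [[l.getD 0 0, l.getD 1 0, 1]] t

theorem pvStepA_append (X : List (List (List Int))) (cur : List (List Int)) (l : List Int) :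
    pvStepA (X ++ [cur]) l =
      if l.getD 0 0 = (cur.getD (cur.length - 1) []).getD 0 0 then
        if l.getD 1 0 = (cur.getD (cur.length - 1) []).getD 1 0 then
          X ++ [cur.set (cur.length - 1)
            ((cur.getD (cur.length - 1) []).set 2 ((cur.getD (cur.length - 1) []).getD 2 0 + 1))]
        else
          X ++ [cur ++ [[l.getD 0 0, l.getD 1 0, 1]]]
      else
        (X ++ [cur]) ++ [[[l.getD 0 0, l.getD 1 0, 1]]] := by
  have hsub : (X ++ [cur]).length - 1 = X.length := by simp
  simp only [pvStepA]
  rw [if_neg (by simp : ¬((X ++ [cur]).length = 0))]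
  simp only [hsub, pvGetD_last, pvSet_last]

theorem pvFoldl_stepA (t : List (List Int)) :
    ∀ (X : List (List (List Int))) (cur : List (List Int)),
      t.foldl pvStepA (X ++ [cur]) = X ++ pvG cur t := by
  induction t with
  | nil => intro X cur; rfl
  | cons l t ih =>
    intro X cur
    rw [List.foldl_cons, pvStepA_append]
    conv_rhs => rw [pvG]
    by_cases h1 : l.getD 0 0 = (cur.getD (cur.length - 1) []).getD 0 0
    · by_cases h2 : l.getD 1 0 = (cur.getD (cur.length - 1) []).getD 1 0
      · rw [if_pos h1, if_pos h2, if_pos h1, if_pos h2, ih]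
      · rw [if_pos h1, if_neg h2, if_pos h1, if_neg h2, ih]
    · rw [if_neg h1, if_neg h1, ih (X ++ [cur])]
      simp

def pvMerge (P : List (List Int)) (a b c : Int) : List (List (List Int)) → List (List (List Int))
  | [] => [P ++ [[a, b, c]]]
  | [] :: rest => (P ++ [[a, b, c]]) :: [] :: rest
  | (p :: G) :: rest =>
    if a = p.getD 0 0 then
      if b = p.getD 1 0 then (P ++ [a, b, c + p.getD 2 0] :: G) :: rest
      else (P ++ [a, b, c] :: p :: G) :: rest
    else (P ++ [[a, b, c]]) :: (p :: G) :: rest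

theorem pvSpecB2_cons (l : List Int) (t : List (List Int)) :
    pvSpecB2 (l :: t) = pvMerge [] (l.getD 0 0) (l.getD 1 0) 1 (pvSpecB2 t) := by
  cases t with
  | nil =>
    simp [pvSpecB2, pvInner, pvRuns, pvRunsCons, pvMkEntry, pvMerge]
  | cons m t' =>
    obtain ⟨g, gs, hr0⟩ := pvRuns_head pvKey0Eq m t'
    obtain ⟨g', gs', hrp⟩ := pvRuns_head pvPairEq m g
    simp only [pvSpecB2]
    rw [show pvRuns pvKey0Eq (l :: m :: t') = pvRunsCons pvKey0Eq l (pvRuns pvKey0Eq (m :: t')) from rfl]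
    rw [hr0]
    by_cases h0 : l[0]?.getD 0 = m[0]?.getD 0
    · have hK0 : pvKey0Eq l m = true := by simp [pvKey0Eq, h0]
      simp only [pvRunsCons, hK0, if_true, List.map_cons, pvInner]
      rw [show pvRuns pvPairEq (l :: m :: g) = pvRunsCons pvPairEq l (pvRuns pvPairEq (m :: g)) from rfl]
      rw [hrp]
      by_cases h1 : l[1]?.getD 0 = m[1]?.getD 0
      · have hP : pvPairEq l m = true := by simp [pvPairEq, h0, h1]
        simp only [pvRunsCons, hP, if_true, List.map_cons]
        simp [pvMerge, pvMkEntry, h0, h1]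
        omega
      · have hP : pvPairEq l m = false := by simp [pvPairEq, h1]
        simp only [pvRunsCons, hP, Bool.false_eq_true, if_false, List.map_cons]
        simp [pvMerge, pvMkEntry, h0, h1]
    · have hK0 : pvKey0Eq l m = false := by simp [pvKey0Eq, h0]
      simp only [pvRunsCons, hK0, Bool.false_eq_true, if_false, List.map_cons, pvInner]
      rw [hrp]
      simp [pvMerge, pvMkEntry, pvRuns, pvRunsCons, h0]

theorem pvM1 (P : List (List Int)) (a b c : Int) (X : List (List (List Int))) :
    pvMerge P a b c (pvMerge [] a b 1 X) = pvMerge P a b (c + 1) X := by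
  rcases X with _ | ⟨G, rest⟩
  · simp [pvMerge, List.getD]
  rcases G with _ | ⟨p, G⟩
  · simp [pvMerge, List.getD]
  by_cases ha : a = p[0]?.getD 0
  · by_cases hb : b = p[1]?.getD 0
    · simp [pvMerge, ha, hb]
      omega
    · simp [pvMerge, ha, hb]
  · simp [pvMerge, ha]

theorem pvM2 (P : List (List Int)) (a b c d : Int) (hbd : b ≠ d) (X : List (List (List Int))) :
    pvMerge P a b c (pvMerge [] a d 1 X) = pvMerge (P ++ [[a, b, c]]) a d 1 X := by
  rcases X with _ | ⟨G, rest⟩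
  · simp [pvMerge, List.getD, hbd]
  rcases G with _ | ⟨p, G⟩
  · simp [pvMerge, List.getD, hbd]
  by_cases ha : a = p[0]?.getD 0
  · by_cases hd : d = p[1]?.getD 0
    · simp [pvMerge, ha, hd, hd ▸ hbd]
    · simp [pvMerge, ha, hd, hbd]
  · simp [pvMerge, ha, hbd]

theorem pvM3 (P : List (List Int)) (a b c d e : Int) (had : a ≠ d) (X : List (List (List Int))) :
    pvMerge P a b c (pvMerge [] d e 1 X) = (P ++ [[a, b, c]]) :: pvMerge [] d e 1 X := by
  rcases X with _ | ⟨G, rest⟩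
  · simp [pvMerge, List.getD, had]
  rcases G with _ | ⟨p, G⟩
  · simp [pvMerge, List.getD, had]
  by_cases hd : d = p[0]?.getD 0
  · by_cases he : e = p[1]?.getD 0
    · simp [pvMerge, hd, he, hd ▸ had]
    · simp [pvMerge, hd, he, hd ▸ had]
  · simp [pvMerge, hd, had]

theorem pvG_merge (t : List (List Int)) :
    ∀ (P : List (List Int)) (a b c : Int),
      pvG (P ++ [[a, b, c]]) t = pvMerge P a b c (pvSpecB2 t) := by
  induction t with
  | nil => intro P a b c; rfl
  | cons l t ih =>
    intro P a b c
    have hsub : (P ++ [[a, b, c]]).length - 1 = P.length := by simp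
    rw [pvG, hsub, pvGetD_last]
    rw [show ([a, b, c] : List Int).getD 0 0 = a from rfl,
        show ([a, b, c] : List Int).getD 1 0 = b from rfl,
        show ([a, b, c] : List Int).getD 2 0 = c from rfl,
        show ([a, b, c] : List Int).set 2 (c + 1) = [a, b, c + 1] from rfl,
        pvSet_last]
    by_cases h1 : l.getD 0 0 = a
    · by_cases h2 : l.getD 1 0 = b
      · rw [if_pos h1, if_pos h2, ih, pvSpecB2_cons, h1, h2, pvM1]
      · rw [if_pos h1, if_neg h2, ih, pvSpecB2_cons, h1,
          pvM2 P a b c (l.getD 1 0) (Ne.symm h2)]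
    · rw [if_neg h1,
        show ([[l.getD 0 0, l.getD 1 0, 1]] : List (List Int)) =
          [] ++ [[l.getD 0 0, l.getD 1 0, 1]] from rfl,
        ih, pvSpecB2_cons,
        pvM3 P a b c (l.getD 0 0) (l.getD 1 0) (Ne.symm h1)]

theorem pvAB (s : List (List Int)) : List.foldl pvStepA [] s = pvSpecB2 s := by
  cases s with
  | nil => rfl
  | cons l t =>
    rw [List.foldl_cons,
      show pvStepA [] l = [] ++ [[[l.getD 0 0, l.getD 1 0, 1]]] from rfl,
      pvFoldl_stepA t [] [[l.getD 0 0, l.getD 1 0, 1]], pvSpecB2_cons]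
    exact pvG_merge t [] _ _ _

-- ===== B's divide-and-conquer equals pvSpecB2 =====

-- gluing two run lists of adjacent slices: fuse the boundary runs iff the last element
-- of the left slice is r-related to the first element of the right slice
def pvBoundary {α : Type} (r : α → α → Bool) : List α → List α → Bool
  | [x], y :: _ => r x y
  | _ :: x :: xs, gb => pvBoundary r (x :: xs) gb
  | _, _ => false

def pvGlueRuns {α : Type} (r : α → α → Bool) : List (List α) → List (List α) → List (List α)
  | [], B => B
  | [ga], B =>
    match B with
    | [] => [ga]
    | gb :: bt => if pvBoundary r ga gb then (ga ++ gb) :: bt else ga :: gb :: bt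
  | ga :: a2 :: A, B => ga :: pvGlueRuns r (a2 :: A) B

theorem pvGlueRuns_single_nil {α : Type} (r : α → α → Bool) (ga : List α) :
    pvGlueRuns r [ga] [] = [ga] := rfl

theorem pvGlueRuns_single_cons {α : Type} (r : α → α → Bool) (ga gb : List α)
    (bt : List (List α)) :
    pvGlueRuns r [ga] (gb :: bt) =
      if pvBoundary r ga gb then (ga ++ gb) :: bt else ga :: gb :: bt := rfl

theorem pvGlueRuns_cons2 {α : Type} (r : α → α → Bool) (ga a2 : List α)
    (A B : List (List α)) :
    pvGlueRuns r (ga :: a2 :: A) B = ga :: pvGlueRuns r (a2 :: A) B := rfl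

theorem pvGetLastD_cons {α : Type} (b a : α) (l : List α) :
    (b :: l).getLastD a = l.getLastD b := by
  rw [List.getLastD_cons]

theorem pvBoundary_cons {α : Type} (r : α → α → Bool) (h : α) (g : List α)
    (y : α) (gb : List α) :
    pvBoundary r (h :: g) (y :: gb) = r (g.getLastD h) y := by
  induction g generalizing h with
  | nil => rfl
  | cons e g' ih =>
    rw [show pvBoundary r (h :: e :: g') (y :: gb) = pvBoundary r (e :: g') (y :: gb) from rfl,
      ih, pvGetLastD_cons]

theorem pvGlue_head {α : Type} (r : α → α → Bool) (c : α) (g : List α)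
    (gs B : List (List α)) : ∃ h T, pvGlueRuns r ((c :: g) :: gs) B = (c :: h) :: T := by
  cases gs with
  | nil =>
    cases B with
    | nil => exact ⟨g, [], rfl⟩
    | cons gb bt =>
      by_cases hb : pvBoundary r (c :: g) gb = true
      · exact ⟨g ++ gb, bt, by rw [pvGlueRuns_single_cons, if_pos hb]; rfl⟩
      · exact ⟨g, gb :: bt, by rw [pvGlueRuns_single_cons, if_neg hb]⟩
  | cons d gs' => exact ⟨g, pvGlueRuns r (d :: gs') B, by rw [pvGlueRuns_cons2]⟩

theorem pvGlue_cons {α : Type} (r : α → α → Bool) (a c : α) (x : List α)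
    (gs B : List (List α)) (h : List α) (T : List (List α))
    (hE : pvGlueRuns r ((c :: x) :: gs) B = h :: T) :
    pvGlueRuns r ((a :: c :: x) :: gs) B = (a :: h) :: T := by
  cases gs with
  | cons d gs' =>
    rw [pvGlueRuns_cons2] at hE
    rw [pvGlueRuns_cons2]
    injection hE with h1 h2
    rw [h1, h2]
  | nil =>
    cases B with
    | nil =>
      rw [pvGlueRuns_single_nil] at hE
      injection hE with h1 h2
      rw [pvGlueRuns_single_nil, h1, h2]
    | cons gb bt =>
      have hbnd : pvBoundary r (a :: c :: x) gb = pvBoundary r (c :: x) gb := rfl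
      rw [pvGlueRuns_single_cons] at hE
      rw [pvGlueRuns_single_cons, hbnd]
      by_cases hb : pvBoundary r (c :: x) gb = true
      · rw [if_pos hb] at hE
        rw [if_pos hb]
        injection hE with h1 h2
        rw [← h1, ← h2]
        rfl
      · rw [if_neg hb] at hE
        rw [if_neg hb]
        injection hE with h1 h2
        rw [h1, h2]

theorem pvRuns_append {α : Type} (r : α → α → Bool) (xs ys : List α) :
    pvRuns r (xs ++ ys) = pvGlueRuns r (pvRuns r xs) (pvRuns r ys) := by
  induction xs with
  | nil => rfl
  | cons a xs ih =>
    cases xs with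
    | nil =>
      cases ys with
      | nil => rfl
      | cons b t =>
        obtain ⟨g, gs, hB⟩ := pvRuns_head r b t
        have h1 : pvRuns r ([a] ++ (b :: t)) = pvRunsCons r a ((b :: g) :: gs) := by
          rw [show ([a] ++ (b :: t)) = a :: b :: t from rfl,
            show pvRuns r (a :: b :: t) = pvRunsCons r a (pvRuns r (b :: t)) from rfl, hB]
        have h2 : pvGlueRuns r (pvRuns r [a]) (pvRuns r (b :: t)) =
            pvGlueRuns r [[a]] ((b :: g) :: gs) := by rw [hB]; rfl
        rw [h1, h2, pvGlueRuns_single_cons,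
          show pvBoundary r [a] (b :: g) = r a b from rfl]
        by_cases hr : r a b = true
        · rw [if_pos hr]; simp [pvRunsCons, hr]
        · rw [if_neg hr]
          rw [Bool.not_eq_true] at hr
          simp [pvRunsCons, hr]
    | cons c xs' =>
      obtain ⟨g, gs, hX⟩ := pvRuns_head r c xs'
      obtain ⟨h, T, hG⟩ := pvGlue_head r c g gs (pvRuns r ys)
      have h1 : pvRuns r ((a :: c :: xs') ++ ys) = pvRunsCons r a ((c :: h) :: T) := by
        rw [show ((a :: c :: xs') ++ ys) = a :: ((c :: xs') ++ ys) from rfl,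
          show pvRuns r (a :: ((c :: xs') ++ ys)) = pvRunsCons r a (pvRuns r ((c :: xs') ++ ys)) from rfl,
          ih, hX, hG]
      have h2 : pvRuns r (a :: c :: xs') = pvRunsCons r a ((c :: g) :: gs) := by
        rw [show pvRuns r (a :: c :: xs') = pvRunsCons r a (pvRuns r (c :: xs')) from rfl, hX]
      rw [h1, h2]
      by_cases hr : r a c = true
      · rw [show pvRunsCons r a ((c :: h) :: T) = (a :: c :: h) :: T from by simp [pvRunsCons, hr],
          show pvRunsCons r a ((c :: g) :: gs) = (a :: c :: g) :: gs from by simp [pvRunsCons, hr]]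
        exact (pvGlue_cons r a c g gs (pvRuns r ys) (c :: h) T hG).symm
      · rw [Bool.not_eq_true] at hr
        rw [show pvRunsCons r a ((c :: h) :: T) = [a] :: (c :: h) :: T from by simp [pvRunsCons, hr],
          show pvRunsCons r a ((c :: g) :: gs) = [a] :: (c :: g) :: gs from by simp [pvRunsCons, hr],
          pvGlueRuns_cons2, hG]

theorem pvGlue_append {α : Type} (r : α → α → Bool) (I : List (List α))
    (ga : List α) (B : List (List α)) :
    pvGlueRuns r (I ++ [ga]) B = I ++ pvGlueRuns r [ga] B := by
  induction I with
  | nil => rfl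
  | cons i I ih =>
    cases I with
    | nil => rw [show ([i] ++ [ga]) = i :: [ga] from rfl, pvGlueRuns_cons2]; rfl
    | cons j I' =>
      rw [show ((i :: j :: I') ++ [ga]) = i :: (j :: (I' ++ [ga])) from rfl, pvGlueRuns_cons2,
        show (j :: (I' ++ [ga])) = (j :: I') ++ [ga] from rfl, ih]
      rfl

-- last run of the run decomposition: its head has the key of the list's last element,
-- and its last element IS the list's last element
theorem pvRuns_last_decomp {α β : Type} [DecidableEq β] (k : α → β) (r : α → α → Bool)
    (hr : ∀ x y, r x y = decide (k x = k y)) (a : α) (t : List α) (d : α) :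
    ∃ J h g, pvRuns r (a :: t) = J ++ [h :: g] ∧
      k h = k ((h :: g).getLastD d) ∧ (h :: g).getLastD d = (a :: t).getLastD d := by
  induction t generalizing a with
  | nil => exact ⟨[], a, [], rfl, rfl, rfl⟩
  | cons b t' ih =>
    obtain ⟨J, h, g, hE, hk, hl⟩ := ih b
    obtain ⟨g0, gs, hH⟩ := pvRuns_head r b t'
    have hstep : pvRuns r (a :: b :: t') = pvRunsCons r a (pvRuns r (b :: t')) := rfl
    have hlast : ((a :: b :: t') : List α).getLastD d = ((b :: t') : List α).getLastD d := by
      simp only [pvGetLastD_cons]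
    by_cases hrab : r a b = true
    · have hkab : k a = k b := of_decide_eq_true ((hr a b) ▸ hrab)
      cases J with
      | nil =>
        have hhb : ((b :: g0) :: gs : List (List α)) = [h :: g] := by
          rw [← hH, hE, List.nil_append]
        injection hhb with h1 h2
        injection h1 with h3 h4
        subst h3; subst h4; subst h2
        refine ⟨[], a, b :: g0, ?_, ?_, ?_⟩
        · rw [hstep, hH]
          simp [pvRunsCons, hrab]
        · rw [hkab, hk]
          simp only [pvGetLastD_cons]
        · simp only [pvGetLastD_cons] at hl ⊢
          exact hl
      | cons j J' =>
        have hhb : ((b :: g0) :: gs : List (List α)) = j :: (J' ++ [h :: g]) := by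
          rw [← hH, hE]; rfl
        injection hhb with h1 h2
        refine ⟨(a :: b :: g0) :: J', h, g, ?_, hk, by rw [hl, hlast]⟩
        rw [hstep, hH]
        simp [pvRunsCons, hrab, h2]
    · rw [Bool.not_eq_true] at hrab
      refine ⟨[a] :: J, h, g, ?_, hk, by rw [hl, hlast]⟩
      rw [hstep, hH,
        show pvRunsCons r a ((b :: g0) :: gs) = [a] :: (b :: g0) :: gs from by
          simp [pvRunsCons, hrab],
        ← hH, hE]
      rfl

theorem pvKey0Eq_eq (x y : List Int) : pvKey0Eq x y = decide (x.getD 0 0 = y.getD 0 0) := by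
  simp only [pvKey0Eq]
  rw [Bool.eq_iff_iff]
  simp

theorem pvPairEq_eq (x y : List Int) :
    pvPairEq x y = decide ((x.getD 0 0, x.getD 1 0) = (y.getD 0 0, y.getD 1 0)) := by
  simp only [pvPairEq]
  rw [Bool.eq_iff_iff]
  simp [Prod.ext_iff]

theorem pvGetLastD_concat {α : Type} (l : List α) (a d : α) :
    (l ++ [a]).getLastD d = a := by
  induction l generalizing d with
  | nil => rfl
  | cons x l ih => rw [List.cons_append, pvGetLastD_cons]; exact ih x

theorem pvMkEntry_cons (h : List Int) (g : List (List Int)) :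
    pvMkEntry (h :: g) = [h.getD 0 0, h.getD 1 0, ((g.length : Int) + 1)] := by
  simp [pvMkEntry]

-- evaluating pvMerge2 on decomposed postings structures
theorem pvMerge2_eval (LI : List (List (List Int))) (MJ : List (List Int))
    (a1 b1 c1 a2 b2 c2 : Int) (RP : List (List Int)) (RT : List (List (List Int))) :
    pvMerge2 (LI ++ [MJ ++ [[a1, b1, c1]]]) (([a2, b2, c2] :: RP) :: RT) =
      if a1 ≠ a2 then (LI ++ [MJ ++ [[a1, b1, c1]]]) ++ (([a2, b2, c2] :: RP) :: RT)
      else LI ++ [if b1 = b2 then MJ ++ [[a1, b1, c1 + c2]] ++ RP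
                  else (MJ ++ [[a1, b1, c1]]) ++ ([a2, b2, c2] :: RP)] ++ RT := by
  simp only [pvMerge2, pvGetLastD_concat, List.headD_cons, List.dropLast_concat,
    List.tail_cons, List.getD_cons_zero, List.getD_cons_succ]

-- the glue theorem: merging the inverted halves inverts the concatenation
theorem pvSpecB2_append (x : List Int) (xs : List (List Int)) (y : List Int)
    (ys : List (List Int)) :
    pvMerge2 (pvSpecB2 (x :: xs)) (pvSpecB2 (y :: ys)) = pvSpecB2 ((x :: xs) ++ (y :: ys)) := by
  obtain ⟨I, hA, gA, hEA, -, -⟩ :=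
    pvRuns_last_decomp (fun v => v.getD 0 0) pvKey0Eq pvKey0Eq_eq x xs []
  obtain ⟨J, hL, gL, hEL, hkL, hlL⟩ :=
    pvRuns_last_decomp (fun v => (v.getD 0 0, v.getD 1 0)) pvPairEq pvPairEq_eq hA gA []
  obtain ⟨gB, gsB, hEB⟩ := pvRuns_head pvKey0Eq y ys
  obtain ⟨gP, gsP, hEP⟩ := pvRuns_head pvPairEq y gB
  -- the last pair of the left half is gA.getLastD hA; the head of the last inner run
  -- of the last outer run carries its keys
  have hz : gL.getLastD hL = gA.getLastD hA := by
    have h' := hlL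
    rw [pvGetLastD_cons, pvGetLastD_cons] at h'
    exact h'
  have hkL' : (hL.getD 0 0, hL.getD 1 0) =
      ((gA.getLastD hA).getD 0 0, (gA.getLastD hA).getD 1 0) := by
    have h' := hkL
    rw [pvGetLastD_cons, hz] at h'
    exact h'
  have hk0 : hL.getD 0 0 = (gA.getLastD hA).getD 0 0 := congrArg Prod.fst hkL'
  have hk1 : hL.getD 1 0 = (gA.getLastD hA).getD 1 0 := congrArg Prod.snd hkL'
  -- both sides in decomposed form
  have hSA : pvSpecB2 (x :: xs) = (List.map pvInner I) ++ [pvInner (hA :: gA)] := by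
    rw [pvSpecB2, hEA, List.map_append]; rfl
  have hSB : pvSpecB2 (y :: ys) = pvInner (y :: gB) :: List.map pvInner gsB := by
    rw [pvSpecB2, hEB]; rfl
  have hIA : pvInner (hA :: gA) =
      (List.map pvMkEntry J) ++ [[hL.getD 0 0, hL.getD 1 0, ((gL.length : Int) + 1)]] := by
    rw [pvInner, hEL, List.map_append, List.map_singleton, pvMkEntry_cons]
  have hIB : pvInner (y :: gB) =
      [y.getD 0 0, y.getD 1 0, ((gP.length : Int) + 1)] :: List.map pvMkEntry gsP := by
    rw [pvInner, hEP, List.map_cons, pvMkEntry_cons]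
  have hRHS : pvSpecB2 ((x :: xs) ++ (y :: ys)) =
      List.map pvInner (I ++ pvGlueRuns pvKey0Eq [hA :: gA] ((y :: gB) :: gsB)) := by
    rw [pvSpecB2, pvRuns_append, hEA, hEB, pvGlue_append]
  have hIF2 : pvInner ((hA :: gA) ++ (y :: gB)) =
      List.map pvMkEntry (J ++ pvGlueRuns pvPairEq [hL :: gL] ((y :: gP) :: gsP)) := by
    rw [pvInner, pvRuns_append, hEL, hEP, pvGlue_append]
  by_cases hxy : (gA.getLastD hA).getD 0 0 = y.getD 0 0
  · -- the boundary term groups fuse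
    have hglue : pvGlueRuns pvKey0Eq [hA :: gA] ((y :: gB) :: gsB) =
        ((hA :: gA) ++ (y :: gB)) :: gsB := by
      rw [pvGlueRuns_single_cons, pvBoundary_cons, pvKey0Eq_eq,
        if_pos (decide_eq_true hxy)]
    rw [hRHS, hglue, hSA, hSB, hIA, hIB, pvMerge2_eval,
      if_neg (not_ne_iff.mpr (hk0.trans hxy)), List.map_append, List.map_cons]
    by_cases hxy1 : (gA.getLastD hA).getD 1 0 = y.getD 1 0
    · -- the boundary postings fuse too
      have hglueI : pvGlueRuns pvPairEq [hL :: gL] ((y :: gP) :: gsP) =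
          ((hL :: gL) ++ (y :: gP)) :: gsP := by
        rw [pvGlueRuns_single_cons, pvBoundary_cons, pvPairEq_eq, hz,
          if_pos (decide_eq_true (by rw [hxy, hxy1]))]
      have hFinal : pvInner ((hA :: gA) ++ (y :: gB)) =
          List.map pvMkEntry J ++
            [hL.getD 0 0, hL.getD 1 0, ((gL.length : Int) + 1) + ((gP.length : Int) + 1)] ::
              List.map pvMkEntry gsP := by
        rw [hIF2, hglueI, List.map_append, List.map_cons,
          show ((hL :: gL) ++ (y :: gP)) = hL :: (gL ++ y :: gP) from rfl, pvMkEntry_cons]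
        refine congrArg (fun n =>
          List.map pvMkEntry J ++ [hL.getD 0 0, hL.getD 1 0, n] :: List.map pvMkEntry gsP) ?_
        simp only [List.length_append, List.length_cons]
        push_cast
        ring
      rw [if_pos (hk1.trans hxy1), hFinal]
      simp [List.append_assoc]
    · -- same term, different doc: postings stay apart
      have hglueI : pvGlueRuns pvPairEq [hL :: gL] ((y :: gP) :: gsP) =
          (hL :: gL) :: (y :: gP) :: gsP := by
        rw [pvGlueRuns_single_cons, pvBoundary_cons, pvPairEq_eq, hz,
          if_neg (by
            simp only [decide_eq_true_eq, Prod.mk.injEq, not_and]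
            intro _ hc
            exact hxy1 hc)]
      have hFinal : pvInner ((hA :: gA) ++ (y :: gB)) =
          List.map pvMkEntry J ++
            [hL.getD 0 0, hL.getD 1 0, ((gL.length : Int) + 1)] ::
              [y.getD 0 0, y.getD 1 0, ((gP.length : Int) + 1)] :: List.map pvMkEntry gsP := by
        rw [hIF2, hglueI, List.map_append, List.map_cons, List.map_cons,
          pvMkEntry_cons, pvMkEntry_cons]
      rw [if_neg (fun hc => hxy1 (hk1.symm.trans hc)), hFinal]
      simp [List.append_assoc]
  · -- different terms: the groups stay apart
    have hglue : pvGlueRuns pvKey0Eq [hA :: gA] ((y :: gB) :: gsB) =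
        (hA :: gA) :: (y :: gB) :: gsB := by
      rw [pvGlueRuns_single_cons, pvBoundary_cons, pvKey0Eq_eq,
        if_neg (by simp only [decide_eq_true_eq]; exact hxy)]
    rw [hRHS, hglue, hSA, hSB, hIA, hIB, pvMerge2_eval,
      if_pos (fun hc => hxy (hk0.symm.trans hc)),
      List.map_append, List.map_cons, List.map_cons, hIA, hIB]
    simp [List.append_assoc]

theorem pvInv_eq : ∀ (s : List (List Int)), pvInv s = pvSpecB2 s
  | [] => by simp [pvInv, pvSpecB2, pvRuns]
  | [l] => by simp [pvInv, pvSpecB2, pvInner, pvRuns, pvRunsCons, pvMkEntry]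
  | l :: m :: t => by
    have e1 := pvInv_eq ((l :: m :: t).take ((l :: m :: t).length / 2))
    have e2 := pvInv_eq ((l :: m :: t).drop ((l :: m :: t).length / 2))
    obtain ⟨a, as, hT⟩ : ∃ a as, (l :: m :: t).take ((l :: m :: t).length / 2) = a :: as := by
      cases hX : (l :: m :: t).take ((l :: m :: t).length / 2) with
      | nil =>
        exfalso
        have hlen := congrArg List.length hX
        rw [List.length_take] at hlen
        simp only [List.length_cons, List.length_nil] at hlen
        omega
      | cons a as => exact ⟨a, as, rfl⟩
    obtain ⟨b, bs, hD⟩ : ∃ b bs, (l :: m :: t).drop ((l :: m :: t).length / 2) = b :: bs := by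
      cases hX : (l :: m :: t).drop ((l :: m :: t).length / 2) with
      | nil =>
        exfalso
        have hlen := congrArg List.length hX
        rw [List.length_drop] at hlen
        simp only [List.length_cons, List.length_nil] at hlen
        omega
      | cons b bs => exact ⟨b, bs, rfl⟩
    rw [pvInv, e1, e2]
    conv_rhs => rw [← List.take_append_drop ((l :: m :: t).length / 2) (l :: m :: t)]
    rw [hT, hD]
    exact pvSpecB2_append a as b bs
termination_by s => s.length
decreasing_by
  · simp
    omega
  · simp
    omega

-- ===== VERDICT (by name: the statement is the Claim_ definition above) =====
theorem bsbi_invert_spec : Claim_equal_bsbi_invert := by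
  intro l _ _
  show bsbi_invert l = bsbi_invert_alt l
  unfold bsbi_invert bsbi_invert_alt
  rw [pvAB, pvInv_eq]
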